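-- pv_equiv track=rewrite | github.com/MarkMilhar/pdl | pdl.py | group_paragraphs
-- ===== SOURCE A (Python) =====
-- def group_paragraphs(lines):
--     """Groups non-empty lines into single lines."""
--     retval = []
--     current_paragraph = []
--     in_paragraph = False
--     for line in lines:
--         if line.startswith("#") or line == "": # directive
--             if in_paragraph:
--                 retval.append(" ".join(current_paragraph))
--                 current_paragraph = []
--                 in_paragraph = False
--             retval.append(line)
--             continue
--         current_paragraph.append(line)
--         in_paragraph = True
--     if current_paragraph:
--          retval.append(" ".join(current_paragraph))
--     return retval
-- ===== SOURCE B (Python) =====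
-- def group_paragraphs(lines):
--     """Groups non-empty lines into single lines."""
--     def is_directive(line):
--         return line.startswith("#") or line == ""
--     out = []
--     i, n = 0, len(lines)
--     while i < n:
--         if is_directive(lines[i]):
--             out.append(lines[i])
--             i += 1
--         else:
--             j = i + 1
--             while j < n and not is_directive(lines[j]):
--                 j += 1
--             out.append(" ".join(lines[i:j]))
--             i = j
--     return out
-- ===== Notes on version B (the rewrite author's own statement) =====
-- stated objective: alternative
-- what changed: Replaces A's in_paragraph flag machine with flush points and a post-loop flush by a two-level index scan: on a content line an inner loop finds the end of the paragraph run and one join over the slice is emitted immediately, so no paragraph buffer or flag is carried.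
import Mathlib
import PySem

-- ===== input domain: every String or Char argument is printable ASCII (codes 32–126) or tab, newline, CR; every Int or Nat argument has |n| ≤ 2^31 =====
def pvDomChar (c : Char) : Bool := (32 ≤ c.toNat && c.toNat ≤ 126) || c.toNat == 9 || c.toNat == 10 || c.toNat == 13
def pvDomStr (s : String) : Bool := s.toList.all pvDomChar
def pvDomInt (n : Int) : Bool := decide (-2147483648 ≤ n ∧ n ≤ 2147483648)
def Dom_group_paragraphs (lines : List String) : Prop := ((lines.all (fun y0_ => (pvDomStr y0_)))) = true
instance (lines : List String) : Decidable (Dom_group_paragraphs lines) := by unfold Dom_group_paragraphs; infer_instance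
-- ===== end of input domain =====

-- Header: B replaces A's in_paragraph flag/buffer machine by a two-level index scan that
-- emits each paragraph with one join over the content run (alternative decomposition, same cost).


-- ===== PORT A =====
-- line.startswith("#") or line == ""
def pvIsDir (line : String) : Bool := PySem.Str.startswith line "#" || line == ""

-- loop body of A: state is (retval, current_paragraph, in_paragraph)
def pvStepA (st : List String × List String × Bool) (line : String) :
    List String × List String × Bool :=
  let (retval, cur, inp) := st
  if pvIsDir line then
    if inp then (retval ++ [PySem.Str.join " " cur] ++ [line], [], false)
    else (retval ++ [line], cur, inp)
  else (retval, cur ++ [line], true)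

-- post-loop flush: if current_paragraph: retval.append(" ".join(current_paragraph))
def pvFlushA (st : List String × List String × Bool) : List String :=
  let (retval, cur, _) := st
  if cur.isEmpty then retval else retval ++ [PySem.Str.join " " cur]

def group_paragraphs (lines : List String) : List String :=
  pvFlushA (lines.foldl pvStepA ([], [], false))

-- ===== PORT B =====
-- B's outer while: a directive line is copied; on a content line the inner while walks to the
-- end of the content run (takeWhile/dropWhile = the j-scan and the slice lines[i:j]).
def group_paragraphs_alt : List String → List String
  | [] => []
  | x :: xs =>
    if pvIsDir x then x :: group_paragraphs_alt xs
    else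
      PySem.Str.join " " (x :: xs.takeWhile (fun l => !pvIsDir l)) ::
        group_paragraphs_alt (xs.dropWhile (fun l => !pvIsDir l))
termination_by lines => lines.length
decreasing_by
  · simp
  · simpa using Nat.lt_succ_of_le (xs.length_dropWhile_le (fun l => !pvIsDir l))

-- ===== PRECONDITION & SPEC =====
def Spec_group_paragraphs (lines : List String) (out : List String) : Prop := out = group_paragraphs_alt lines
instance (lines : List String) (out : List String) : Decidable (Spec_group_paragraphs lines out) := by unfold Spec_group_paragraphs; infer_instance

-- ===== CLAIM (what is proved, stated in full; the proofs are below) =====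
def Claim_equal_group_paragraphs : Prop := ∀ (lines : List String), Dom_group_paragraphs lines → Spec_group_paragraphs lines (group_paragraphs lines)

-- ===== LEMMAS AND PROOFS =====

-- Combined invariant for A's loop, proved by strong induction on the remaining input:
-- (1) from an idle state the loop computes retval ++ B's answer;
-- (2) inside a paragraph with buffer cur ≠ [], the loop joins cur with the rest of the
--     content run and then proceeds as B does.
theorem pv_key : ∀ (n : Nat) (lines : List String), lines.length ≤ n →
    (∀ retval, pvFlushA (lines.foldl pvStepA (retval, [], false))
        = retval ++ group_paragraphs_alt lines) ∧
    (∀ retval cur, cur ≠ [] →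
      pvFlushA (lines.foldl pvStepA (retval, cur, true))
        = retval ++ PySem.Str.join " " (cur ++ lines.takeWhile (fun l => !pvIsDir l)) ::
            group_paragraphs_alt (lines.dropWhile (fun l => !pvIsDir l))) := by
  intro n
  induction n with
  | zero =>
    intro lines h
    have : lines = [] := List.eq_nil_of_length_eq_zero (Nat.le_zero.mp h)
    subst this
    constructor
    · intro retval; simp [pvFlushA, group_paragraphs_alt]
    · intro retval cur hc
      simp [pvFlushA, List.isEmpty_eq_false_iff.mpr hc, group_paragraphs_alt]
  | succ n ih =>
    intro lines h
    match lines with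
    | [] =>
      constructor
      · intro retval; simp [pvFlushA, group_paragraphs_alt]
      · intro retval cur hc
        simp [pvFlushA, List.isEmpty_eq_false_iff.mpr hc, group_paragraphs_alt]
    | x :: xs =>
      have hx : xs.length ≤ n := by simpa using Nat.succ_le_succ_iff.mp h
      constructor
      · intro retval
        by_cases hd : pvIsDir x
        · rw [List.foldl_cons]
          have : pvStepA (retval, [], false) x = (retval ++ [x], [], false) := by
            simp [pvStepA, hd]
          rw [this, (ih xs hx).1]
          simp [group_paragraphs_alt, hd]
        · rw [List.foldl_cons]
          have : pvStepA (retval, [], false) x = (retval, [x], true) := by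
            simp [pvStepA, hd]
          rw [this, (ih xs hx).2 retval [x] (by simp)]
          simp [group_paragraphs_alt, hd]
      · intro retval cur hc
        by_cases hd : pvIsDir x
        · rw [List.foldl_cons]
          have : pvStepA (retval, cur, true) x
              = (retval ++ [PySem.Str.join " " cur] ++ [x], [], false) := by
            simp [pvStepA, hd]
          rw [this, (ih xs hx).1]
          simp [group_paragraphs_alt, hd, List.takeWhile, List.dropWhile]
        · rw [List.foldl_cons]
          have : pvStepA (retval, cur, true) x = (retval, cur ++ [x], true) := by
            simp [pvStepA, hd]
          rw [this, (ih xs hx).2 retval (cur ++ [x]) (by simp)]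
          simp [List.takeWhile, List.dropWhile, hd]

-- ===== VERDICT (by name: the statement is the Claim_ definition above) =====
theorem group_paragraphs_spec : Claim_equal_group_paragraphs := by
  intro lines _
  unfold Spec_group_paragraphs group_paragraphs
  simpa using (pv_key lines.length lines le_rfl).1 []
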